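-- pv_equiv track=rewrite | github.com/adnanali88/COMP-5361-Discrete-Structures-and-Formal-Languages | Assignments/A2 - Propositional Variables/src/part1.py | bracket_eval
-- ===== SOURCE A (Python) =====
-- def bracket_eval(logi, start):
--     try:
--         i = logi.index('(', start)
--         for x in range(i+1,len(logi)):
--             if logi[x] == '(':
--                 return bracket_eval(logi,x)
--             elif logi[x] == ')':
--                 return logi[i:x+1], logi[i+2:x-1]
--     except:
--         return logi,logi
-- ===== SOURCE B (Python) =====
-- def bracket_eval(logi, start):
--     i0 = logi.find('(', start)
--     if i0 == -1:
--         return logi, logi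
--     j = logi.find(')', i0 + 1)
--     if j == -1:
--         return None
--     i = logi.rfind('(', 0, j)
--     return logi[i:j+1], logi[i+2:j-1]
-- ===== Notes on version B (the rewrite author's own statement) =====
-- stated objective: simpler
-- what changed: A's recursive descent (index('(',start), then a char-by-char scan that re-invokes bracket_eval at every nested '(') is replaced by three straight library searches: find the first '(' at/after start, the first ')' after it, and rfind the last '(' before that ')'.
-- outside the precondition, e.g. on bracket_eval('(a', 0): A returns None, B returns None
import Mathlib
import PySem

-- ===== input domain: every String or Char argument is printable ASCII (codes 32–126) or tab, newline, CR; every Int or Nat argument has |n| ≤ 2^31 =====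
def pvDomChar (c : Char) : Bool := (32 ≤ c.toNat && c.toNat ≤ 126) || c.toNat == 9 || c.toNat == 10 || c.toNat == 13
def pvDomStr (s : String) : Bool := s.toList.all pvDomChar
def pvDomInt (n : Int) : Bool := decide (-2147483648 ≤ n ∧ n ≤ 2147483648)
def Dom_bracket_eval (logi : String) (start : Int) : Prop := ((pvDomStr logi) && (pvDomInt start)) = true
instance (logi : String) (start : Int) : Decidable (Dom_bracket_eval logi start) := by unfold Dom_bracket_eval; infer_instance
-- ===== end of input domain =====

-- B replaces A's recursive descent with a char-by-char loop by three library find/rfind calls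
-- (first '(', first ')' after it, last '(' before that) — simpler, no recursion, same values.

-- ===== PORT A =====
-- A with a fuel parameter (fuel only bounds the recursion depth; `bracket_eval` below
-- supplies length+1, which is proved sufficient — the fuel = 0 branch is never reached there).
mutual
  -- body of `def bracket_eval(logi, start)`: i = logi.index('(', start) (ValueError → except → (logi, logi))
  def bracketEvalFuel (fuel : Nat) (logi : String) (start : Int) : String × String :=
    match fuel with
    | 0 => (logi, logi)
    | f + 1 =>
      let r := PySem.Str.findFrom logi "(" start none
      if r = -1 then (logi, logi)   -- str.index raised ValueError; the bare `except` returns (logi, logi)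
      else bracketLoopFuel f logi r.toNat (r.toNat + 1)
  termination_by (fuel, 0)
  decreasing_by exact Prod.Lex.left _ _ (Nat.lt_succ_self _)

  -- `for x in range(i+1, len(logi)): …` of A
  def bracketLoopFuel (fuel : Nat) (logi : String) (i x : Nat) : String × String :=
    if h : x < logi.toList.length then
      if logi.toList[x] = '(' then bracketEvalFuel fuel logi (x : Int)     -- return bracket_eval(logi, x)
      else if logi.toList[x] = ')' then
        (PySem.Str.slice logi (some (i : Int)) (some ((x : Int) + 1)),
         PySem.Str.slice logi (some ((i : Int) + 2)) (some ((x : Int) - 1)))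
      else bracketLoopFuel fuel logi i (x + 1)
    else (logi, logi)   -- Python A falls off the loop and returns None here: excluded by Pre_
  termination_by (fuel, logi.toList.length - x + 1)
  decreasing_by
    · exact Prod.Lex.right _ (by omega)
    · exact Prod.Lex.right _ (by omega)
end

def bracket_eval (logi : String) (start : Int) : String × String :=
  bracketEvalFuel (logi.toList.length + 1) logi start

-- ===== PORT B =====
def bracket_eval_alt (logi : String) (start : Int) : String × String :=
  let i0 := PySem.Str.findFrom logi "(" start none
  if i0 = -1 then (logi, logi)
  else
    let j := PySem.Str.findFrom logi ")" (i0 + 1) none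
    if j = -1 then (logi, logi)   -- Source B returns None here (exactly where A does): excluded by Pre_
    else
      let i := PySem.Str.rfindFrom logi "(" 0 (some j)
      (PySem.Str.slice logi (some i) (some (j + 1)),
       PySem.Str.slice logi (some (i + 2)) (some (j - 1)))

-- ===== PRECONDITION & SPEC =====
-- Pre_ excludes exactly the inputs on which A (and B) return Python None — a '(' is found at or
-- after `start` but no ')' follows it — because None is not a value of the declared pair type.
def Pre_bracket_eval (logi : String) (start : Int) : Prop :=
  let cs := logi.toList
  let s := PySem.List.clampIdx cs.length start
  ((List.range cs.length).any fun i => decide (s ≤ i) && (cs.getD i ' ' == '(')) = true →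
  ((List.range cs.length).any fun j => (cs.getD j ' ' == ')') &&
      ((List.range j).any fun i => decide (s ≤ i) && (cs.getD i ' ' == '('))) = true
instance (logi : String) (start : Int) : Decidable (Pre_bracket_eval logi start) := by
  unfold Pre_bracket_eval; infer_instance

def pvWitness_bracket_eval : String × Int := ("p and (q or (r))", 0)

def Spec_bracket_eval (logi : String) (start : Int) (out : String × String) : Prop := out = bracket_eval_alt logi start
instance (logi : String) (start : Int) (out : String × String) : Decidable (Spec_bracket_eval logi start out) := by unfold Spec_bracket_eval; infer_instance

-- ===== CLAIM (what is proved, stated in full; the proofs are below) =====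
def Claim_equal_bracket_eval : Prop := ∀ (logi : String) (start : Int), Dom_bracket_eval logi start → Pre_bracket_eval logi start → Spec_bracket_eval logi start (bracket_eval logi start)

-- ===== LEMMAS AND PROOFS =====

lemma pv_clampIdx_cast (n : Nat) (start : Int) (hle : start ≤ n) :
    ((PySem.List.clampIdx n start : Nat) : Int) =
      if start < 0 then (if start + n < 0 then 0 else start + n) else start := by
  simp only [PySem.List.clampIdx]
  split_ifs <;> omega

lemma pv_findFrom_clamp (cs sub : List Char) (start : Int) (hsub : sub ≠ []) :
    PySem.Chars.findFrom cs sub start none =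
      PySem.Chars.findFrom cs sub ((PySem.List.clampIdx cs.length start : Nat) : Int) none := by
  have hfindnil : PySem.Chars.find ([] : List Char) sub = -1 := by
    cases sub with
    | nil => exact absurd rfl hsub
    | cons a t => simp [PySem.Chars.find, PySem.Chars.find.go]
  by_cases hgt : (cs.length : Int) < start
  · have h0 : ¬ start < 0 := by omega
    have hk : PySem.List.clampIdx cs.length start = cs.length := by
      simp only [PySem.List.clampIdx]; split_ifs <;> omega
    rw [hk]
    simp only [PySem.Chars.findFrom, h0, if_false]
    rw [if_pos hgt]
    have h2 : ¬ ((cs.length : Nat) : Int) < 0 := by omega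
    simp only [h2, if_false]
    rw [if_neg (by omega)]
    simp [hfindnil]
  · have hle : start ≤ (cs.length : Int) := by omega
    have hst := pv_clampIdx_cast cs.length start hle
    have h1 : ¬ ((PySem.List.clampIdx cs.length start : Nat) : Int) < 0 := by omega
    simp only [PySem.Chars.findFrom]
    rw [← hst]
    simp only [h1, if_false]

lemma pv_singleton_prefix (cs : List Char) (c : Char) (i : Nat) :
    ([c] <+: cs.drop i) ↔ cs[i]? = some c := by
  rw [← List.head?_drop]
  cases h : cs.drop i with
  | nil => simp
  | cons a t => simp [List.cons_prefix_cons, eq_comm]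

lemma pv_singleton_infix_of_mem (cs : List Char) (c : Char) (j : Nat)
    (hj : cs[j]? = some c) : [c] <:+: cs := by
  have hmem : c ∈ cs := List.mem_of_getElem? hj
  obtain ⟨t, u, rfl⟩ := List.append_of_mem hmem
  exact ⟨t, u, by simp⟩

lemma pv_findFrom_self (cs : List Char) (c : Char) (x : Nat)
    (hx : cs[x]? = some c) :
    PySem.Chars.findFrom cs [c] (x : Int) none = x := by
  have hxlen : x < cs.length := by
    by_contra h
    simp [List.getElem?_eq_none (by omega : cs.length ≤ x)] at hx
  rw [PySem.Chars.findFrom_natCast cs [c] x (by omega)]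
  have hpfx0 : [c] <+: (cs.drop x) := (pv_singleton_prefix cs c x).mpr hx
  have hne : PySem.Chars.find (cs.drop x) [c] ≠ -1 := by
    rw [PySem.Chars.find_ne_neg_one_iff]
    exact hpfx0.isInfix
  have hnn : 0 ≤ PySem.Chars.find (cs.drop x) [c] := by
    have := PySem.Chars.neg_one_le_find (cs.drop x) [c]
    omega
  obtain ⟨h1, h2⟩ := PySem.Chars.find_spec hnn
  have hz : (PySem.Chars.find (cs.drop x) [c]).toNat = 0 := by
    by_contra hz
    exact h2 0 (by omega) (by simpa using hpfx0)
  rw [if_neg hne]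
  omega

lemma pv_rfind_go (t : List Char) (c : Char) (iL : Nat)
    (hc : t[iL]? = some c) (hlast : ∀ k, iL < k → k < t.length → t[k]? ≠ some c) :
    ∀ m, iL ≤ m → m ≤ t.length → PySem.Chars.rfind.go t [c] m = iL := by
  intro m
  induction m with
  | zero =>
    intro h1 _
    have : iL = 0 := by omega
    subst this
    have : [c].isPrefixOf t = true := by
      rw [List.isPrefixOf_iff_prefix]
      simpa using (pv_singleton_prefix t c 0).mpr hc
    simp [PySem.Chars.rfind.go, this]
  | succ j ih =>
    intro h1 h2
    by_cases he : iL = j + 1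
    · subst he
      have : [c].isPrefixOf (t.drop (j+1)) = true := by
        rw [List.isPrefixOf_iff_prefix]
        exact (pv_singleton_prefix t c (j+1)).mpr hc
      simp [PySem.Chars.rfind.go, this]
    · have hlt : iL ≤ j := by omega
      have : ¬ [c].isPrefixOf (t.drop (j+1)) = true := by
        rw [List.isPrefixOf_iff_prefix, pv_singleton_prefix]
        intro hck
        by_cases hjl : j + 1 < t.length
        · exact hlast (j+1) (by omega) hjl hck
        · simp [List.getElem?_eq_none (by omega : t.length ≤ j+1)] at hck
      simp only [PySem.Chars.rfind.go, this]
      exact ih hlt (by omega)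

lemma pv_rfindFrom (cs : List Char) (c : Char) (j iL : Nat) (hj : j ≤ cs.length)
    (hiL : iL < j) (hc : cs[iL]? = some c)
    (hlast : ∀ k, iL < k → k < j → cs[k]? ≠ some c) :
    PySem.Chars.rfindFrom cs [c] 0 (some (j : Int)) = iL := by
  simp only [PySem.Chars.rfindFrom]
  rw [if_neg (by omega), if_neg (by omega : ¬ ((j:Int) < 0))]
  have hnotlt : ¬ ((cs.length:Int) < (j:Int)) := by omega
  rw [if_neg hnotlt]
  norm_num
  have hlen : (cs.take j).length = j := by simp [hj]
  have hgo : PySem.Chars.rfind (cs.take j) [c] = iL := by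
    have hc' : (cs.take j)[iL]? = some c := by
      rw [List.getElem?_take_of_lt hiL]; exact hc
    have hlast' : ∀ k, iL < k → k < (cs.take j).length → (cs.take j)[k]? ≠ some c := by
      intro k h1 h2
      rw [hlen] at h2
      rw [List.getElem?_take_of_lt h2]
      exact hlast k h1 h2
    have := pv_rfind_go (cs.take j) c iL hc' hlast' (cs.take j).length (by omega) (by omega)
    simpa [PySem.Chars.rfind] using this
  rw [hgo]
  rw [if_neg (by omega)]

-- A's loop, characterized: scanning from x with current open bracket i0, it ends at the first
-- ')' (at j) and by then i0 has become iL, the last '(' before j.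
lemma pv_loopA (logi : String) (j iL : Nat)
    (hjn : j < logi.toList.length) (hjc : logi.toList[j]? = some ')')
    (hiLj : iL < j) (hiLc : logi.toList[iL]? = some '(')
    (hiLlast : ∀ k, iL < k → k < j → logi.toList[k]? ≠ some '(') :
    ∀ m fuel i0 x, j - x = m → x ≤ j → i0 < x → logi.toList[i0]? = some '(' →
      (∀ k, i0 < k → k < x → logi.toList[k]? ≠ some '(') →
      (∀ k, x ≤ k → k < j → logi.toList[k]? ≠ some ')') →
      i0 ≤ iL → j - x + 1 ≤ fuel →
      bracketLoopFuel fuel logi i0 x =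
        (PySem.Str.slice logi (some (iL : Int)) (some ((j : Int) + 1)),
         PySem.Str.slice logi (some ((iL : Int) + 2)) (some ((j : Int) - 1))) := by
  intro m
  induction m using Nat.strong_induction_on with
  | _ m ih =>
    intro fuel i0 x hm hxj hi0x hi0c hi0last hnoclose hi0iL hfuel
    have hxn : x < logi.toList.length := by omega
    rw [bracketLoopFuel, dif_pos hxn]
    by_cases hopen : logi.toList[x] = '('
    · have hxq : logi.toList[x]? = some '(' := by rw [List.getElem?_eq_getElem hxn, hopen]
      have hxj' : x < j := by
        rcases Nat.lt_or_ge x j with h | h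
        · exact h
        · exfalso
          have hxe : x = j := by omega
          subst hxe
          rw [List.getElem?_eq_getElem hxn, hopen] at hjc
          simp at hjc
      rw [if_pos hopen]
      obtain ⟨f, rfl⟩ : ∃ f, fuel = f + 1 := ⟨fuel - 1, by omega⟩
      rw [bracketEvalFuel]
      have hfind : PySem.Str.findFrom logi "(" ((x : Nat) : Int) none = (x : Int) := by
        rw [PySem.Str.findFrom_eq]
        exact pv_findFrom_self _ _ _ hxq
      simp only [hfind]
      rw [if_neg (by omega : ¬ ((x : Int) = -1))]
      have hTo : ((x : Int)).toNat = x := by omega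
      rw [hTo]
      have hxle : x ≤ iL := by
        by_contra hlt
        exact hiLlast x (by omega) hxj' hxq
      exact ih (j - (x + 1)) (by omega) f x (x + 1) rfl (by omega) (by omega) hxq
        (by intro k h1 h2; exact absurd h2 (by omega))
        (by intro k h1 h2; exact hnoclose k (by omega) h2)
        hxle (by omega)
    · rw [if_neg hopen]
      by_cases hclose : logi.toList[x] = ')'
      · have hxe : x = j := by
          by_contra hne
          have hxj' : x < j := by omega
          exact hnoclose x (by omega) hxj' (by rw [List.getElem?_eq_getElem hxn, hclose])
        subst hxe
        have hieq : i0 = iL := by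
          by_contra hne
          have hlt : i0 < iL := by omega
          exact hi0last iL hlt (by omega) hiLc
        rw [if_pos hclose, hieq]
      · rw [if_neg hclose]
        have hxj' : x < j := by
          by_contra h
          have hxe : x = j := by omega
          subst hxe
          rw [List.getElem?_eq_getElem hxn] at hjc
          exact hclose (by injection hjc)
        exact ih (j - (x + 1)) (by omega) fuel i0 (x + 1) rfl (by omega) (by omega) hi0c
          (by intro k h1 h2
              by_cases hk : k = x
              · subst hk; rw [List.getElem?_eq_getElem hxn]
                intro hcon; exact hopen (by injection hcon)
              · exact hi0last k h1 (by omega))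
          (by intro k h1 h2; exact hnoclose k (by omega) h2)
          hi0iL (by omega)

-- ===== VERDICT (by name: the statement is the Claim_ definition above) =====
theorem bracket_eval_spec : Claim_equal_bracket_eval := by
  intro logi start _dom hpre
  unfold Spec_bracket_eval bracket_eval bracket_eval_alt
  rw [bracketEvalFuel]
  by_cases hr : PySem.Str.findFrom logi "(" start none = -1
  · simp only [hr, reduceIte]
  · rw [if_neg hr, if_neg hr]
    have hsn : PySem.List.clampIdx logi.toList.length start ≤ logi.toList.length :=
      PySem.List.clampIdx_le _ _
    have hclamp : PySem.Str.findFrom logi "(" start none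
        = PySem.Chars.findFrom logi.toList ['('] ((PySem.List.clampIdx logi.toList.length start : Nat) : Int) none := by
      rw [PySem.Str.findFrom_eq]
      exact pv_findFrom_clamp logi.toList ['('] start (by simp)
    rw [hclamp] at hr ⊢
    obtain ⟨hFs, hFp, hFmin⟩ :=
      PySem.Chars.findFrom_natCast_spec logi.toList ['('] _ hsn hr
    set F := PySem.Chars.findFrom logi.toList ['('] ((PySem.List.clampIdx logi.toList.length start : Nat) : Int) none with hF
    set s := PySem.List.clampIdx logi.toList.length start with hsdef
    set i0 := F.toNat with hi0def
    have hF0 : (0 : Int) ≤ F := le_trans (Int.natCast_nonneg _) hFs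
    have hFi0 : F = (i0 : Int) := by omega
    have hi0c : logi.toList[i0]? = some '(' := (pv_singleton_prefix _ _ _).mp hFp
    have hi0n : i0 < logi.toList.length := by
      by_contra h
      simp [List.getElem?_eq_none (by omega : logi.toList.length ≤ i0)] at hi0c
    have hi0min : ∀ k, s ≤ k → k < i0 → logi.toList[k]? ≠ some '(' := by
      intro k h1 h2 hk
      exact hFmin k h1 h2 ((pv_singleton_prefix _ _ _).mpr hk)
    -- discharge Pre_'s antecedent and extract a closing bracket after i0
    unfold Pre_bracket_eval at hpre
    simp only [List.any_eq_true, List.mem_range, Bool.and_eq_true, decide_eq_true_eq, beq_iff_eq] at hpre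
    obtain ⟨j0, hj0n, hj0c, i1, hi1j0, hi1s, hi1c⟩ :=
      hpre ⟨i0, hi0n, by omega, by rw [List.getD_eq_getElem?_getD, hi0c]; rfl⟩
    have hi1q : logi.toList[i1]? = some '(' := by
      rw [List.getElem?_eq_getElem (by omega), ← List.getD_eq_getElem _ ' ' , hi1c]
    have hi1ge : i0 ≤ i1 := by
      by_contra h
      exact hi0min i1 hi1s (by omega) hi1q
    have hj0q : logi.toList[j0]? = some ')' := by
      rw [List.getElem?_eq_getElem hj0n, ← List.getD_eq_getElem _ ' ', hj0c]
    -- B's second find: the first ')' after i0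
    have hinf : [')'] <:+: logi.toList.drop (i0 + 1) := by
      apply pv_singleton_infix_of_mem (logi.toList.drop (i0 + 1)) ')' (j0 - (i0 + 1))
      rw [List.getElem?_drop]
      rw [show i0 + 1 + (j0 - (i0 + 1)) = j0 from by omega]
      exact hj0q
    have hFc : F + 1 = (((i0 + 1 : Nat)) : Int) := by omega
    have hrj : PySem.Str.findFrom logi ")" (F + 1) none
        = PySem.Chars.findFrom logi.toList [')'] (((i0 + 1 : Nat)) : Int) none := by
      rw [PySem.Str.findFrom_eq, hFc]; rfl
    have hrjne : PySem.Chars.findFrom logi.toList [')'] (((i0 + 1 : Nat)) : Int) none ≠ -1 := by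
      rw [ne_eq, PySem.Chars.findFrom_natCast_eq_neg_one_iff _ _ _ (by omega)]
      simpa using hinf
    obtain ⟨hJs, hJp, hJmin⟩ :=
      PySem.Chars.findFrom_natCast_spec logi.toList [')'] (i0 + 1) (by omega) hrjne
    set J := PySem.Chars.findFrom logi.toList [')'] (((i0 + 1 : Nat)) : Int) none with hJ
    set j := J.toNat with hjdef
    have hJj : J = (j : Int) := by omega
    have hjc : logi.toList[j]? = some ')' := (pv_singleton_prefix _ _ _).mp hJp
    have hjn : j < logi.toList.length := by
      by_contra h
      simp [List.getElem?_eq_none (by omega : logi.toList.length ≤ j)] at hjc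
    have hi0j : i0 < j := by omega
    have hjmin : ∀ k, i0 + 1 ≤ k → k < j → logi.toList[k]? ≠ some ')' := by
      intro k h1 h2 hk
      exact hJmin k h1 h2 ((pv_singleton_prefix _ _ _).mpr hk)
    -- the last '(' before j
    set iL := Nat.findGreatest (fun k => logi.toList[k]? = some '(') (j - 1) with hiLdef
    have hiLc : logi.toList[iL]? = some '(' :=
      Nat.findGreatest_spec (P := fun k => logi.toList[k]? = some '(')
        (by omega : i0 ≤ j - 1) hi0c
    have hi0iL : i0 ≤ iL := Nat.le_findGreatest (P := fun k => logi.toList[k]? = some '(')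
      (by omega) hi0c
    have hiLj : iL < j := by
      have := Nat.findGreatest_le (P := fun k => logi.toList[k]? = some '(') (j - 1)
      omega
    have hiLlast : ∀ k, iL < k → k < j → logi.toList[k]? ≠ some '(' := by
      intro k h1 h2
      exact Nat.findGreatest_is_greatest h1 (by omega)
    -- LHS: A's loop
    have hLHS := pv_loopA logi j iL hjn hjc hiLj hiLc hiLlast
      (j - (i0 + 1)) logi.toList.length i0 (i0 + 1) rfl (by omega) (by omega) hi0c
      (by intro k h1 h2; exact absurd h2 (by omega))
      (by intro k h1 h2; exact hjmin k h1 h2)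
      hi0iL (by omega)
    rw [hFi0]
    rw [hLHS]
    -- RHS: B's rfind
    rw [show PySem.Str.findFrom logi ")" ((i0 : Int) + 1) none = J from by rw [← hFi0]; exact hrj]
    rw [if_neg (by omega : ¬ (J = -1))]
    have hrf : PySem.Str.rfindFrom logi "(" 0 (some J) = (iL : Int) := by
      rw [PySem.Str.rfindFrom_eq, hJj]
      rw [show ("(" : String).toList = ['('] from rfl]
      rw [pv_rfindFrom logi.toList '(' j iL (by omega) hiLj hiLc hiLlast]
    rw [hrf, hJj]
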